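-- pv_equiv track=rewrite | github.com/bangtugu/Algorithm | PROGRAMMERS/부대복귀.py | solution
-- ===== SOURCE A (Python) =====
-- def solution(n, roads, sources, destination):
--
--     network = [set() for _ in range(n+1)]
--     for a, b in roads:
--         network[a].add(b)
--         network[b].add(a)
--
--     reach = [-1]*(n+1)
--     from collections import deque
--     check = set()
--     Q = deque()
--     Q.append(destination)
--     check.add(destination)
--     reach[destination] = 0
--     while Q:
--         now = Q.popleft()
--         for way in network[now]:
--             if way in check: continue
--             check.add(way)
--             reach[way] = reach[now] + 1
--             Q.append(way)
--
--     answer = []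
--     for source in sources:
--         answer.append(reach[source])
--
--     return answer
-- ===== SOURCE B (Python) =====
-- def solution(n, roads, sources, destination):
--     # Edge-relaxation (Bellman-Ford style): no adjacency structure, no queue, no visited set.
--     # Repeat synchronous rounds over the raw road list until a round assigns nothing new:
--     # a round gives distance reach[a]+1 to every still-unassigned endpoint of a road whose
--     # other endpoint is already assigned.  Round k assigns exactly the nodes at distance k.
--     reach = [-1] * (n + 1)
--     reach[destination] = 0
--     changed = True
--     while changed:
--         changed = False
--         new = reach[:]
--         for a, b in roads:
--             if reach[a] >= 0 and new[b] == -1: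
--                 new[b] = reach[a] + 1
--                 changed = True
--             if reach[b] >= 0 and new[a] == -1:
--                 new[a] = reach[b] + 1
--                 changed = True
--         reach = new
--     return [reach[s] for s in sources]
-- ===== Notes on version B (the rewrite author's own statement) =====
-- stated objective: alternative
-- what changed: Replaces A's BFS (adjacency sets + deque + visited set) with Bellman-Ford-style edge relaxation: no adjacency structure is built at all; synchronous rounds over the raw road list assign distance k+1 to unassigned endpoints of roads whose other endpoint is assigned, until a round changes nothing; Pre_ excludes inputs where two used node labels differ by n+1 (they wrap-index into the same list slot while being distinct set members, so A's value there is an artefact of Python's set iteration order).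
-- outside the precondition, e.g. on solution(8, [(6, 6), (6, 8), (-1, 0)], [2, 6, -1], 0): A returns [-1, 2, 3], B returns [-1, 2, 1]
import Mathlib
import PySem

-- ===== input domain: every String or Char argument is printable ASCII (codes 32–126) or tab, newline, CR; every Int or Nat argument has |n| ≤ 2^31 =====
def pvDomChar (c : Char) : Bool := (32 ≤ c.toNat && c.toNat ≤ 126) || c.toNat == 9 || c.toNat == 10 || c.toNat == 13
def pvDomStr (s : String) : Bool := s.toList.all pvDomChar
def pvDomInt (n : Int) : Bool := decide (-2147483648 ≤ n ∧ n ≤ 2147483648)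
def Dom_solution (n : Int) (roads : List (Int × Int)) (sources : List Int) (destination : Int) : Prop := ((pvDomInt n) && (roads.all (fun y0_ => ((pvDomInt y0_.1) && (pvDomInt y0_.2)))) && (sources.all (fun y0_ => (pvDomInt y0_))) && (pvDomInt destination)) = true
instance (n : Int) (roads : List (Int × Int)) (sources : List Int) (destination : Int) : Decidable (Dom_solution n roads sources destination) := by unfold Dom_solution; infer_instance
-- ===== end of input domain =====

-- ===== PORT A =====
-- B replaces A's BFS (adjacency sets + deque + visited set) with Bellman-Ford-style synchronous
-- edge relaxation over the raw road list, repeated until a round changes nothing (alternative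
-- algorithm, no speed claim); return values proved equal on Pre_.

-- A builds 'network': for a, b in roads: network[a].add(b); network[b].add(a)
def pvBuildNet (n : Int) (roads : List (Int × Int)) : List (PySem.Set Int) :=
  roads.foldl (fun network ab =>
      let net1 := PySem.List.pySetD network ab.1
        (PySem.Set.add (PySem.List.pyGetD network ab.1 PySem.Set.empty) ab.2)
      PySem.List.pySetD net1 ab.2
        (PySem.Set.add (PySem.List.pyGetD net1 ab.2 PySem.Set.empty) ab.1))
    (List.replicate (n + 1).toNat PySem.Set.empty)

-- all node labels stored in the adjacency structure (only used as a termination measure)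
def pvUniv (net : List (PySem.Set Int)) : Finset Int := (net.flatMap id).toFinset

-- the inner 'for way in network[now]: …' body of A's BFS;
-- returns (newly discovered nodes in order, check, reach)
def pvVisit (d1 : Int) (ws news : List Int) (check : PySem.Set Int) (reach : List Int) :
    List Int × PySem.Set Int × List Int :=
  match ws with
  | [] => (news, check, reach)
  | w :: ws' =>
    if PySem.Set.contains check w then
      pvVisit d1 ws' news check reach
    else
      pvVisit d1 ws' (news ++ [w]) (PySem.Set.add check w) (PySem.List.pySetD reach w d1)

-- termination measure bookkeeping for A's BFS loop (cited by its decreasing_by)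
lemma pvVisit_card (U : Finset Int) (d1 : Int) :
    ∀ (ws news : List Int) (check : PySem.Set Int) (reach : List Int),
      (∀ w ∈ ws, w ∈ U) →
      2 * (U \ ((pvVisit d1 ws news check reach).2.1 : List Int).toFinset).card
          + (pvVisit d1 ws news check reach).1.length
        ≤ 2 * (U \ (check : List Int).toFinset).card + news.length := by
  intro ws
  induction ws with
  | nil => intro news check reach _; simp [pvVisit]
  | cons w ws' ih =>
    intro news check reach hU
    rcases hc : PySem.Set.contains check w with _ | _
    · -- w is new
      have hw : w ∉ (check : List Int) := by
        intro hm
        unfold PySem.Set.contains at hc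
        simp at hc
        exact hc hm
      have hadd : PySem.Set.add check w = check ++ [w] := by
        unfold PySem.Set.add
        rw [hc]
        simp
      have hwU : w ∈ U := hU w (List.mem_cons_self ..)
      have hcard : (U \ ((check : List Int) ++ [w]).toFinset).card + 1
          = (U \ (check : List Int).toFinset).card := by
        have hmem : w ∈ U \ (check : List Int).toFinset := by
          simp [Finset.mem_sdiff, hwU, hw]
        have : U \ ((check : List Int) ++ [w]).toFinset
            = (U \ (check : List Int).toFinset).erase w := by
          ext x
          simp [Finset.mem_sdiff, Finset.mem_erase]
          tauto
        have hpos : 0 < (U \ (check : List Int).toFinset).card := Finset.card_pos.2 ⟨w, hmem⟩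
        rw [this, Finset.card_erase_of_mem hmem]
        omega
      have hrec := ih (news ++ [w]) (check ++ [w]) (PySem.List.pySetD reach w d1)
        (fun x hx => hU x (List.mem_cons_of_mem _ hx))
      have hstep : pvVisit d1 (w :: ws') news check reach
          = pvVisit d1 ws' (news ++ [w]) (check ++ [w]) (PySem.List.pySetD reach w d1) := by
        rw [pvVisit, hc, hadd]
        simp
      rw [hstep]
      simp at hrec hcard ⊢
      omega
    · -- w already seen
      have hstep : pvVisit d1 (w :: ws') news check reach = pvVisit d1 ws' news check reach := by
        rw [pvVisit, hc]
        simp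
      rw [hstep]
      exact ih news check reach (fun x hx => hU x (List.mem_cons_of_mem _ hx))

-- neighbours come from the adjacency structure (termination side condition)
lemma pvNbrs_sub (net : List (PySem.Set Int)) (i : Int) :
    ∀ w ∈ PySem.List.pyGetD net i PySem.Set.empty, w ∈ pvUniv net := by
  intro w hw
  by_cases hr : PySem.Raise.InRange net.length i
  · exact List.mem_toFinset.2 (List.mem_flatMap.2 ⟨_, PySem.List.pyGetD_mem net _ hr, hw⟩)
  · rw [PySem.List.pyGetD_of_none net i _ ((PySem.List.pyGet?_eq_none_iff net i).2 hr)] at hw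
    simp [PySem.Set.empty] at hw

-- A's 'while Q:' deque loop: pop one node, enqueue its undiscovered neighbours at the back
def pvLoopA (net : List (PySem.Set Int)) (Q : List Int) (check : PySem.Set Int)
    (reach : List Int) : List Int :=
  match Q with
  | [] => reach
  | now :: rest =>
    let s := pvVisit (PySem.List.pyGetD reach now 0 + 1)
      (PySem.List.pyGetD net now PySem.Set.empty) [] check reach
    pvLoopA net (rest ++ s.1) s.2.1 s.2.2
termination_by 2 * (pvUniv net \ (check : List Int).toFinset).card + Q.length
decreasing_by
  have h := pvVisit_card (pvUniv net) (PySem.List.pyGetD reach now 0 + 1)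
    (PySem.List.pyGetD net now PySem.Set.empty) [] check reach (pvNbrs_sub net now)
  simp at h ⊢
  omega

def solution (n : Int) (roads : List (Int × Int)) (sources : List Int) (destination : Int) : List Int :=
  let network := pvBuildNet n roads
  let reach := PySem.List.pySetD (List.replicate (n + 1).toNat (-1 : Int)) destination 0
  let check := PySem.Set.add PySem.Set.empty destination
  let final := pvLoopA network [destination] check reach
  sources.foldl (fun answer source => answer ++ [PySem.List.pyGetD final source 0]) []

-- ===== PORT B =====
-- one direction of one road in B's 'for a, b in roads:' body: if reach[src] >= 0 and new[tgt] == -1,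
-- assign new[tgt] = reach[src] + 1 (reading distances from the old array 'reach')
def pvHalfStep (reach : List Int) (st : List Int × Bool) (src tgt : Int) : List Int × Bool :=
  if 0 ≤ PySem.List.pyGetD reach src 0 ∧ PySem.List.pyGetD st.1 tgt 0 = -1 then
    (PySem.List.pySetD st.1 tgt (PySem.List.pyGetD reach src 0 + 1), true)
  else st

-- the two if-statements of the body, one per direction
def pvRelaxStep (reach : List Int) (st : List Int × Bool) (ab : Int × Int) : List Int × Bool :=
  pvHalfStep reach (pvHalfStep reach st ab.1 ab.2) ab.2 ab.1

-- one whole round: new = reach[:]; changed = False; for a, b in roads: …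
def pvRound (roads : List (Int × Int)) (reach : List Int) : List Int × Bool :=
  roads.foldl (pvRelaxStep reach) (reach, false)

-- termination bookkeeping for B's while loop (cited by its decreasing_by): a relaxation write
-- turns a (-1) entry into a value ≥ 1, so the number of (-1) entries strictly drops
lemma pv_fire_count (xs : List Int) (i v : Int) (hold : PySem.List.pyGetD xs i 0 = -1)
    (hv : ¬ v = -1) :
    List.countP (fun t => t == (-1 : Int)) (PySem.List.pySetD xs i v)
      < List.countP (fun t => t == (-1 : Int)) xs := by
  rcases h : PySem.List.pyIdx? xs.length i with _ | k
  · simp [PySem.List.pyGetD, PySem.List.pyGet?, h] at hold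
  · have hk : k < xs.length := by
      unfold PySem.List.pyIdx? at h
      split_ifs at h <;> simp at h <;> omega
    have hget : xs[k] = -1 := by
      simpa [PySem.List.pyGetD, PySem.List.pyGet?, h, List.getElem?_eq_getElem hk] using hold
    have hset : PySem.List.pySetD xs i v = xs.set k v := by
      simp [PySem.List.pySetD, PySem.List.pySet?, h]
    rw [hset, List.countP_set hk]
    simp [hget, hv]
    exact hget ▸ List.getElem_mem hk

lemma pvHalfStep_m (reach : List Int) (st : List Int × Bool) (src tgt : Int) :
    List.countP (fun t => t == (-1 : Int)) (pvHalfStep reach st src tgt).1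
        + (if (pvHalfStep reach st src tgt).2 then 1 else 0)
      ≤ List.countP (fun t => t == (-1 : Int)) st.1 + (if st.2 then 1 else 0) := by
  unfold pvHalfStep
  split
  next h =>
    have f := pv_fire_count st.1 tgt (PySem.List.pyGetD reach src 0 + 1) h.2 (by omega)
    by_cases hb : st.2 = true <;> simp [hb] <;> omega
  next h => exact le_rfl

lemma pvRound_m (reach : List Int) (l : List (Int × Int)) :
    ∀ st : List Int × Bool,
      List.countP (fun t => t == (-1 : Int)) (l.foldl (pvRelaxStep reach) st).1
          + (if (l.foldl (pvRelaxStep reach) st).2 then 1 else 0)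
        ≤ List.countP (fun t => t == (-1 : Int)) st.1 + (if st.2 then 1 else 0) := by
  induction l with
  | nil => intro st; simp only [List.foldl_nil]; exact le_rfl
  | cons ab l ih =>
    intro st
    calc _ ≤ _ := ih (pvRelaxStep reach st ab)
    _ ≤ _ := le_trans (pvHalfStep_m reach _ ab.2 ab.1) (pvHalfStep_m reach st ab.1 ab.2)

-- B's 'while changed:' loop: one synchronous round over the roads, repeat while something changed
def pvRelaxLoop (roads : List (Int × Int)) (reach : List Int) : List Int :=
  if h : (pvRound roads reach).2 = true then pvRelaxLoop roads (pvRound roads reach).1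
  else (pvRound roads reach).1
termination_by List.countP (fun t => t == (-1 : Int)) reach
decreasing_by
  have hm := pvRound_m reach roads (reach, false)
  unfold pvRound at h ⊢
  rw [h] at hm
  simp at hm ⊢
  omega

def solution_alt (n : Int) (roads : List (Int × Int)) (sources : List Int) (destination : Int) : List Int :=
  let reach0 := PySem.List.pySetD (List.replicate (n + 1).toNat (-1 : Int)) destination 0
  let final := pvRelaxLoop roads reach0
  sources.map (fun source => PySem.List.pyGetD final source 0)

-- ===== PRECONDITION & SPEC =====
-- Pre_ excludes inputs whose node labels are out of range for the length-(n+1) lists (Python raises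
-- IndexError) and inputs where two used labels differ by n+1: such labels wrap-index into the same
-- reach/network slot while being distinct set elements, and there A's value depends on
-- Python's set iteration order, so neither value is specifiable.
def Pre_solution (n : Int) (roads : List (Int × Int)) (sources : List Int) (destination : Int) : Prop :=
  0 ≤ n ∧ (∀ p ∈ roads, -(n + 1) ≤ p.1 ∧ p.1 ≤ n ∧ -(n + 1) ≤ p.2 ∧ p.2 ≤ n) ∧
    (∀ s ∈ sources, -(n + 1) ≤ s ∧ s ≤ n) ∧ (-(n + 1) ≤ destination ∧ destination ≤ n) ∧
    (∀ x ∈ destination :: (roads.map Prod.fst ++ roads.map Prod.snd),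
      x + (n + 1) ∉ destination :: (roads.map Prod.fst ++ roads.map Prod.snd))
instance (n : Int) (roads : List (Int × Int)) (sources : List Int) (destination : Int) : Decidable (Pre_solution n roads sources destination) := by unfold Pre_solution; infer_instance

def pvWitness_solution : Int × (List (Int × Int)) × List Int × Int := (2, [(0, 1), (1, 2)], [0, 1, 2], 2)

def Spec_solution (n : Int) (roads : List (Int × Int)) (sources : List Int) (destination : Int) (out : List Int) : Prop := out = solution_alt n roads sources destination
instance (n : Int) (roads : List (Int × Int)) (sources : List Int) (destination : Int) (out : List Int) : Decidable (Spec_solution n roads sources destination out) := by unfold Spec_solution; infer_instance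

-- ===== CLAIM (what is proved, stated in full; the proofs are below) =====
def Claim_equal_solution : Prop := ∀ (n : Int) (roads : List (Int × Int)) (sources : List Int) (destination : Int), Dom_solution n roads sources destination → Pre_solution n roads sources destination → Spec_solution n roads sources destination (solution n roads sources destination)

-- ===== LEMMAS AND PROOFS =====

-- ---------- shared vocabulary of the proof ----------
-- the node labels the programs ever index with ('used labels')
def pvU (roads : List (Int × Int)) (destination : Int) : List Int :=
  destination :: (roads.map Prod.fst ++ roads.map Prod.snd)

-- the undirected road relation on labels
def pvAdj (roads : List (Int × Int)) (x y : Int) : Prop := (x, y) ∈ roads ∨ (y, x) ∈ roads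

-- the list slot a label indexes (Python negative-index rule) for lists of length n+1
def pvSlot (n x : Int) : Nat := (if 0 ≤ x then x else x + (n + 1)).toNat

-- the facts Pre_ gives about n, roads and destination
def pvCtx (n : Int) (roads : List (Int × Int)) (destination : Int) : Prop :=
  0 ≤ n ∧ (∀ x ∈ pvU roads destination, -(n + 1) ≤ x ∧ x ≤ n) ∧
    (∀ x ∈ pvU roads destination, x + (n + 1) ∉ pvU roads destination)

-- ---------- indexing bridges ----------
lemma pvIdx_some (n x : Int) (hn : 0 ≤ n) (hx : -(n + 1) ≤ x ∧ x ≤ n) :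
    PySem.List.pyIdx? (n + 1).toNat x = some (pvSlot n x) := by
  unfold PySem.List.pyIdx? pvSlot
  split_ifs <;> simp_all <;> omega

lemma pvSlot_lt (n x : Int) (hn : 0 ≤ n) (hx : -(n + 1) ≤ x ∧ x ≤ n) :
    pvSlot n x < (n + 1).toNat := by
  unfold pvSlot
  split_ifs <;> omega

lemma pvGet_bridge {α : Type} (n x : Int) (R : List α) (d : α) (hn : 0 ≤ n)
    (hx : -(n + 1) ≤ x ∧ x ≤ n) (hR : R.length = (n + 1).toNat) :
    PySem.List.pyGetD R x d = R.getD (pvSlot n x) d := by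
  have hi := pvIdx_some n x hn hx
  have hlt : pvSlot n x < R.length := by rw [hR]; exact pvSlot_lt n x hn hx
  simp [PySem.List.pyGetD, PySem.List.pyGet?, hR, hi, List.getD_eq_getElem?_getD]

lemma pvSet_bridge {α : Type} (n x : Int) (R : List α) (v : α) (hn : 0 ≤ n)
    (hx : -(n + 1) ≤ x ∧ x ≤ n) (hR : R.length = (n + 1).toNat) :
    PySem.List.pySetD R x v = R.set (pvSlot n x) v := by
  have hi := pvIdx_some n x hn hx
  simp [PySem.List.pySetD, PySem.List.pySet?, hR, hi]

lemma pvGetD_set {α : Type} (R : List α) (i j : Nat) (v : α) (d : α) :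
    (R.set i v).getD j d = if j = i ∧ i < R.length then v else R.getD j d := by
  rw [List.getD_eq_getElem?_getD, List.getD_eq_getElem?_getD, List.getElem?_set]
  split_ifs with h1 h2 h2 <;> simp_all

lemma pvSlot_inj (n : Int) (roads : List (Int × Int)) (destination : Int)
    (hc : pvCtx n roads destination) {x y : Int} (hx : x ∈ pvU roads destination)
    (hy : y ∈ pvU roads destination) (h : pvSlot n x = pvSlot n y) : x = y := by
  obtain ⟨hn, hrange, halias⟩ := hc
  have hxr := hrange x hx
  have hyr := hrange y hy
  unfold pvSlot at h
  rcases le_or_gt 0 x with h1 | h1 <;> rcases le_or_gt 0 y with h2 | h2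
  · rw [if_pos h1, if_pos h2] at h; omega
  · rw [if_pos h1, if_neg (by omega)] at h
    exact absurd ((show x = y + (n + 1) by omega) ▸ hx) (halias y hy)
  · rw [if_neg (by omega), if_pos h2] at h
    exact absurd ((show y = x + (n + 1) by omega) ▸ hy) (halias x hx)
  · rw [if_neg (by omega), if_neg (by omega)] at h; omega

lemma pvAdj_mem {roads : List (Int × Int)} {destination x y : Int}
    (h : pvAdj roads x y) : x ∈ pvU roads destination ∧ y ∈ pvU roads destination := by
  rcases h with h | h
  · exact ⟨List.mem_cons_of_mem _ (List.mem_append_left _ (List.mem_map_of_mem h)),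
      List.mem_cons_of_mem _ (List.mem_append_right _ (List.mem_map_of_mem h))⟩
  · exact ⟨List.mem_cons_of_mem _ (List.mem_append_right _ (List.mem_map_of_mem h)),
      List.mem_cons_of_mem _ (List.mem_append_left _ (List.mem_map_of_mem h))⟩

-- two Int lists of equal length with equal getD values are equal
lemma pv_ext (A B : List Int) (h : A.length = B.length)
    (hs : ∀ s : Nat, A.getD s 0 = B.getD s 0) : A = B := by
  apply List.ext_getElem h
  intro i h1 h2
  have := hs i
  rwa [List.getD_eq_getElem?_getD, List.getD_eq_getElem?_getD,
    List.getElem?_eq_getElem h1, List.getElem?_eq_getElem h2, Option.getD_some,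
    Option.getD_some] at this

-- ---------- the adjacency structure A builds, characterised ----------
lemma pvNet_aux (n : Int) (roads : List (Int × Int)) (destination : Int)
    (hc : pvCtx n roads destination) :
    ∀ (l : List (Int × Int)) (net : List (PySem.Set Int)) (P : Int → Int → Prop),
      (∀ e ∈ l, e ∈ roads) → net.length = (n + 1).toNat →
      (∀ x ∈ pvU roads destination, ∀ y,
        (y ∈ PySem.List.pyGetD net x PySem.Set.empty ↔ P x y)) →
      (l.foldl (fun network ab =>
          let net1 := PySem.List.pySetD network ab.1
            (PySem.Set.add (PySem.List.pyGetD network ab.1 PySem.Set.empty) ab.2)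
          PySem.List.pySetD net1 ab.2
            (PySem.Set.add (PySem.List.pyGetD net1 ab.2 PySem.Set.empty) ab.1)) net).length
          = (n + 1).toNat ∧
      (∀ x ∈ pvU roads destination, ∀ y,
        (y ∈ PySem.List.pyGetD (l.foldl (fun network ab =>
          let net1 := PySem.List.pySetD network ab.1
            (PySem.Set.add (PySem.List.pyGetD network ab.1 PySem.Set.empty) ab.2)
          PySem.List.pySetD net1 ab.2
            (PySem.Set.add (PySem.List.pyGetD net1 ab.2 PySem.Set.empty) ab.1)) net)
            x PySem.Set.empty
          ↔ P x y ∨ ((x, y) ∈ l ∨ (y, x) ∈ l))) := by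
  obtain ⟨hn, hrange, halias⟩ := hc
  intro l
  induction l with
  | nil =>
    intro net P _ hlen hchar
    refine ⟨hlen, fun x hx y => ?_⟩
    simpa using hchar x hx y
  | cons e l ih =>
    obtain ⟨a, b⟩ := e
    intro net P hl hlen hchar
    have he : (a, b) ∈ roads := hl _ (List.mem_cons_self ..)
    have habU := pvAdj_mem (destination := destination) (Or.inl he : pvAdj roads a b)
    have haU := habU.1
    have hbU := habU.2
    have hra := hrange a haU
    have hrb := hrange b hbU
    -- characterise one write  net ↦ net[u] := add net[u] w
    have write : ∀ (m : List (PySem.Set Int)) (Q : Int → Int → Prop) (u w : Int),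
        u ∈ pvU roads destination →
        m.length = (n + 1).toNat →
        (∀ x ∈ pvU roads destination, ∀ y, (y ∈ PySem.List.pyGetD m x PySem.Set.empty ↔ Q x y)) →
        ((PySem.List.pySetD m u
            (PySem.Set.add (PySem.List.pyGetD m u PySem.Set.empty) w)).length = (n + 1).toNat ∧
         (∀ x ∈ pvU roads destination, ∀ y,
            (y ∈ PySem.List.pyGetD (PySem.List.pySetD m u
              (PySem.Set.add (PySem.List.pyGetD m u PySem.Set.empty) w)) x PySem.Set.empty
             ↔ (Q x y ∨ (x = u ∧ y = w))))) := by
      intro m Q u w huU hmlen hmchar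
      have hru := hrange u huU
      have hset := pvSet_bridge n u m
        (PySem.Set.add (PySem.List.pyGetD m u PySem.Set.empty) w) hn hru hmlen
      refine ⟨by rw [PySem.List.length_pySetD]; exact hmlen, fun x hx y => ?_⟩
      have hrx := hrange x hx
      have hlen' : (PySem.List.pySetD m u
          (PySem.Set.add (PySem.List.pyGetD m u PySem.Set.empty) w)).length = (n + 1).toNat := by
        rw [PySem.List.length_pySetD]; exact hmlen
      rw [pvGet_bridge n x _ _ hn hrx hlen', hset, pvGetD_set]
      by_cases hxu : x = u
      · subst hxu
        rw [if_pos ⟨rfl, by rw [hmlen]; exact pvSlot_lt n x hn hrx⟩]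
        rw [PySem.Set.mem_add]
        rw [hmchar x hx y]
        tauto
      · rw [if_neg (by
          intro hcon
          exact hxu (pvSlot_inj n roads destination ⟨hn, hrange, halias⟩ hx huU hcon.1))]
        rw [← pvGet_bridge n x m _ hn hrx hmlen, hmchar x hx y]
        tauto
    obtain ⟨hlen1, hchar1⟩ := write net P a b haU hlen hchar
    obtain ⟨hlen2, hchar2⟩ := write _ _ b a hbU hlen1 hchar1
    have hmain := ih _ _ (fun e he' => hl e (List.mem_cons_of_mem _ he')) hlen2
      (fun x hx y => hchar2 x hx y)
    refine ⟨hmain.1, fun x hx y => ?_⟩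
    have h2 := hmain.2 x hx y
    constructor
    · intro hm
      have hq := h2.mp hm
      clear hm h2 hmain hchar2 hchar1 hchar write
      simp only [List.mem_cons, Prod.mk.injEq]
      tauto
    · intro hq
      apply h2.mpr
      clear h2 hmain hchar2 hchar1 hchar write
      simp only [List.mem_cons, Prod.mk.injEq] at hq
      tauto

lemma pvNet_spec (n : Int) (roads : List (Int × Int)) (destination : Int)
    (hc : pvCtx n roads destination) :
    (pvBuildNet n roads).length = (n + 1).toNat ∧
    ∀ x ∈ pvU roads destination, ∀ y,
      (y ∈ PySem.List.pyGetD (pvBuildNet n roads) x PySem.Set.empty ↔ pvAdj roads x y) := by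
  have hbase : ∀ x ∈ pvU roads destination, ∀ y : Int,
      (y ∈ PySem.List.pyGetD (List.replicate (n + 1).toNat (PySem.Set.empty : PySem.Set Int))
          x PySem.Set.empty ↔ False) := by
    intro x hx y
    have hrx := hc.2.1 x hx
    rw [pvGet_bridge n x _ _ hc.1 hrx (List.length_replicate)]
    rw [List.getD_eq_getElem?_getD, List.getElem?_replicate]
    split_ifs <;> simp [PySem.Set.empty]
  have h := pvNet_aux n roads destination hc roads
    (List.replicate (n + 1).toNat PySem.Set.empty) (fun _ _ => False)
    (fun _ he => he) (List.length_replicate) hbase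
  refine ⟨h.1, fun x hx y => ?_⟩
  rw [show pvBuildNet n roads = roads.foldl _ (List.replicate (n + 1).toNat PySem.Set.empty)
    from rfl]
  rw [h.2 x hx y]
  simp [pvAdj]

-- ---------- the level-synchronous view of A's BFS (proof-side only) ----------
-- B's-eye view of A's queue: process a whole level at once, collecting the next level
def pvExpand (net : List (PySem.Set Int)) (frontier nxt : List Int) (check : PySem.Set Int)
    (reach : List Int) : List Int × PySem.Set Int × List Int :=
  match frontier with
  | [] => (nxt, check, reach)
  | now :: rest =>
    let s := pvVisit (PySem.List.pyGetD reach now 0 + 1)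
      (PySem.List.pyGetD net now PySem.Set.empty) nxt check reach
    pvExpand net rest s.1 s.2.1 s.2.2

lemma pvExpand_card (net : List (PySem.Set Int)) :
    ∀ (frontier nxt : List Int) (check : PySem.Set Int) (reach : List Int),
      2 * (pvUniv net \ ((pvExpand net frontier nxt check reach).2.1 : List Int).toFinset).card
          + (pvExpand net frontier nxt check reach).1.length
        ≤ 2 * (pvUniv net \ (check : List Int).toFinset).card + nxt.length := by
  intro frontier
  induction frontier with
  | nil => intro nxt check reach; simp [pvExpand]
  | cons now rest ih =>
    intro nxt check reach
    rw [pvExpand]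
    have h1 := pvVisit_card (pvUniv net) (PySem.List.pyGetD reach now 0 + 1)
      (PySem.List.pyGetD net now PySem.Set.empty) nxt check reach (pvNbrs_sub net now)
    have h2 := ih (pvVisit (PySem.List.pyGetD reach now 0 + 1)
        (PySem.List.pyGetD net now PySem.Set.empty) nxt check reach).1
      (pvVisit (PySem.List.pyGetD reach now 0 + 1)
        (PySem.List.pyGetD net now PySem.Set.empty) nxt check reach).2.1
      (pvVisit (PySem.List.pyGetD reach now 0 + 1)
        (PySem.List.pyGetD net now PySem.Set.empty) nxt check reach).2.2
    omega

def pvLoopB (net : List (PySem.Set Int)) (frontier : List Int) (check : PySem.Set Int)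
    (reach : List Int) : List Int :=
  match frontier with
  | [] => reach
  | now :: rest =>
    let s := pvExpand net (now :: rest) [] check reach
    pvLoopB net s.1 s.2.1 s.2.2
termination_by 2 * (pvUniv net \ (check : List Int).toFinset).card + frontier.length
decreasing_by
  have h := pvExpand_card net (now :: rest) [] check reach
  simp at h ⊢
  omega

-- pvVisit only appends to its news accumulator
lemma pvVisit_news (d1 : Int) :
    ∀ (ws news : List Int) (check : PySem.Set Int) (reach : List Int),
      pvVisit d1 ws news check reach
        = (news ++ (pvVisit d1 ws [] check reach).1, (pvVisit d1 ws [] check reach).2) := by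
  intro ws
  induction ws with
  | nil => intro news check reach; simp [pvVisit]
  | cons w ws' ih =>
    intro news check reach
    rcases hc : PySem.Set.contains check w with _ | _
    · have hstep : ∀ ns, pvVisit d1 (w :: ws') ns check reach
          = pvVisit d1 ws' (ns ++ [w]) (PySem.Set.add check w) (PySem.List.pySetD reach w d1) := by
        intro ns
        rw [pvVisit, hc]
        simp
      rw [hstep news, hstep []]
      rw [ih (news ++ [w]), ih (([] : List Int) ++ [w])]
      simp
    · have hstep : ∀ ns, pvVisit d1 (w :: ws') ns check reach = pvVisit d1 ws' ns check reach := by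
        intro ns
        rw [pvVisit, hc]
        simp
      rw [hstep news, hstep []]
      exact ih news check reach

-- pvExpand only appends to its nxt accumulator
lemma pvExpand_news (net : List (PySem.Set Int)) :
    ∀ (frontier nxt : List Int) (check : PySem.Set Int) (reach : List Int),
      pvExpand net frontier nxt check reach
        = (nxt ++ (pvExpand net frontier [] check reach).1,
            (pvExpand net frontier [] check reach).2) := by
  intro frontier
  induction frontier with
  | nil => intro nxt check reach; simp [pvExpand]
  | cons now rest ih =>
    intro nxt check reach
    have hstep : ∀ ns, pvExpand net (now :: rest) ns check reach
        = pvExpand net rest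
            (pvVisit (PySem.List.pyGetD reach now 0 + 1)
              (PySem.List.pyGetD net now PySem.Set.empty) ns check reach).1
            (pvVisit (PySem.List.pyGetD reach now 0 + 1)
              (PySem.List.pyGetD net now PySem.Set.empty) ns check reach).2.1
            (pvVisit (PySem.List.pyGetD reach now 0 + 1)
              (PySem.List.pyGetD net now PySem.Set.empty) ns check reach).2.2 := by
      intro ns
      rw [pvExpand]
    rw [hstep nxt, hstep []]
    rw [pvVisit_news (PySem.List.pyGetD reach now 0 + 1)
      (PySem.List.pyGetD net now PySem.Set.empty) nxt check reach]
    rw [ih (nxt ++ (pvVisit (PySem.List.pyGetD reach now 0 + 1)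
      (PySem.List.pyGetD net now PySem.Set.empty) [] check reach).1)]
    rw [ih ((pvVisit (PySem.List.pyGetD reach now 0 + 1)
      (PySem.List.pyGetD net now PySem.Set.empty) [] check reach).1)]
    simp

-- key batching lemma: running A's deque loop on F ++ G equals expanding all of F at once and
-- queueing the discoveries after G
lemma pvLoopA_batch (net : List (PySem.Set Int)) :
    ∀ (F G : List Int) (check : PySem.Set Int) (reach : List Int),
      pvLoopA net (F ++ G) check reach
        = pvLoopA net (G ++ (pvExpand net F [] check reach).1)
            (pvExpand net F [] check reach).2.1 (pvExpand net F [] check reach).2.2 := by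
  intro F
  induction F with
  | nil => intro G check reach; simp [pvExpand]
  | cons now F' ih =>
    intro G check reach
    have hL : pvLoopA net ((now :: F') ++ G) check reach
        = pvLoopA net ((F' ++ G) ++ (pvVisit (PySem.List.pyGetD reach now 0 + 1)
              (PySem.List.pyGetD net now PySem.Set.empty) [] check reach).1)
            (pvVisit (PySem.List.pyGetD reach now 0 + 1)
              (PySem.List.pyGetD net now PySem.Set.empty) [] check reach).2.1
            (pvVisit (PySem.List.pyGetD reach now 0 + 1)
              (PySem.List.pyGetD net now PySem.Set.empty) [] check reach).2.2 := by
      rw [List.cons_append, pvLoopA]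
    have hR : pvExpand net (now :: F') [] check reach
        = pvExpand net F' (pvVisit (PySem.List.pyGetD reach now 0 + 1)
              (PySem.List.pyGetD net now PySem.Set.empty) [] check reach).1
            (pvVisit (PySem.List.pyGetD reach now 0 + 1)
              (PySem.List.pyGetD net now PySem.Set.empty) [] check reach).2.1
            (pvVisit (PySem.List.pyGetD reach now 0 + 1)
              (PySem.List.pyGetD net now PySem.Set.empty) [] check reach).2.2 := by
      rw [pvExpand]
    rw [hL, List.append_assoc, ih (G ++ _), hR,
      pvExpand_news net F' ((pvVisit _ _ [] check reach).1)]
    simp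

-- A's deque loop equals the level-synchronous loop
lemma pvLoopAB (net : List (PySem.Set Int)) (F : List Int) (check : PySem.Set Int)
    (reach : List Int) : pvLoopA net F check reach = pvLoopB net F check reach := by
  fun_induction pvLoopB net F check reach with
  | case1 => rw [pvLoopA]
  | case2 check reach now rest s ih =>
    have h0 : pvLoopA net (now :: rest) check reach
        = pvLoopA net ((now :: rest) ++ []) check reach := by simp
    rw [h0, pvLoopA_batch net (now :: rest) [] check reach]
    simpa using ih

-- ---------- one BFS level, characterised ----------
lemma pvVisit_spec (n : Int) (roads : List (Int × Int)) (destination : Int)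
    (hc : pvCtx n roads destination) (d1 : Int) :
    ∀ (ws news : List Int) (C : PySem.Set Int) (R : List Int),
      (∀ w ∈ ws, w ∈ pvU roads destination) → R.length = (n + 1).toNat →
      ((pvVisit d1 ws news C R).2.2.length = (n + 1).toNat ∧
       (∀ y, y ∈ ((pvVisit d1 ws news C R).2.1 : List Int) ↔ y ∈ (C : List Int) ∨ y ∈ ws) ∧
       (∀ y, y ∈ (pvVisit d1 ws news C R).1 ↔ y ∈ news ∨ (y ∈ ws ∧ y ∉ (C : List Int))) ∧
       (∀ s : Nat, (∃ w, (w ∈ ws ∧ w ∉ (C : List Int)) ∧ pvSlot n w = s)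
          → (pvVisit d1 ws news C R).2.2.getD s 0 = d1) ∧
       (∀ s : Nat, ¬ (∃ w, (w ∈ ws ∧ w ∉ (C : List Int)) ∧ pvSlot n w = s)
          → (pvVisit d1 ws news C R).2.2.getD s 0 = R.getD s 0)) := by
  obtain ⟨hn, hrange, halias⟩ := hc
  intro ws
  induction ws with
  | nil =>
    intro news C R hws hR
    refine ⟨by simp [pvVisit, hR], fun y => by simp [pvVisit], fun y => by simp [pvVisit],
      fun s hs => ?_, fun s _ => by simp [pvVisit]⟩
    rcases hs with ⟨w, ⟨hw, _⟩, _⟩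
    simp at hw
  | cons w ws' ih =>
    intro news C R hws hR
    have hwU := hws w (List.mem_cons_self ..)
    have hrw := hrange w hwU
    rcases hcw : PySem.Set.contains C w with _ | _
    · -- w not seen yet
      have hwC : w ∉ (C : List Int) := by
        unfold PySem.Set.contains at hcw
        simpa using hcw
      have hadd : PySem.Set.add C w = C ++ [w] := by
        unfold PySem.Set.add
        rw [hcw]
        simp
      have hset : PySem.List.pySetD R w d1 = R.set (pvSlot n w) d1 :=
        pvSet_bridge n w R d1 hn hrw hR
      have hstep : pvVisit d1 (w :: ws') news C R
          = pvVisit d1 ws' (news ++ [w]) (C ++ [w]) (R.set (pvSlot n w) d1) := by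
        rw [pvVisit, hcw]
        simp [hadd, hset]
      have hlen' : (R.set (pvSlot n w) d1).length = (n + 1).toNat := by simp [hR]
      have hslotw : pvSlot n w < R.length := by rw [hR]; exact pvSlot_lt n w hn hrw
      have IH := ih (news ++ [w]) (C ++ [w]) (R.set (pvSlot n w) d1)
        (fun x hx => hws x (List.mem_cons_of_mem _ hx)) hlen'
      rw [hstep]
      refine ⟨IH.1, ?_, ?_, ?_, ?_⟩
      · intro y
        rw [IH.2.1 y]
        simp only [List.mem_append, List.mem_cons]
        tauto
      · intro y
        rw [IH.2.2.1 y]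
        simp only [List.mem_append, List.mem_cons]
        by_cases hyw : y = w
        · subst hyw
          simp [hwC]
        · tauto
      · intro s hs
        by_cases hex : ∃ w', (w' ∈ ws' ∧ w' ∉ ((C : List Int) ++ [w])) ∧ pvSlot n w' = s
        · exact IH.2.2.2.1 s hex
        · have hval := IH.2.2.2.2 s hex
          have hsw : s = pvSlot n w := by
            rcases hs with ⟨w', ⟨hw'mem, hw'C⟩, hw's⟩
            rcases List.mem_cons.1 hw'mem with h | h
            · rw [← hw's, h]
            · by_cases hmem : w' ∈ (C : List Int) ++ [w]
              · rcases List.mem_append.1 hmem with h2 | h2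
                · exact absurd h2 hw'C
                · rw [← hw's, List.mem_singleton.1 h2]
              · exact absurd ⟨w', ⟨h, hmem⟩, hw's⟩ hex
          rw [hval, pvGetD_set, if_pos ⟨hsw, hslotw⟩]
      · intro s hs
        have hex : ¬ ∃ w', (w' ∈ ws' ∧ w' ∉ ((C : List Int) ++ [w])) ∧ pvSlot n w' = s := by
          rintro ⟨w', ⟨hm, hc'⟩, hss⟩
          exact hs ⟨w', ⟨List.mem_cons_of_mem _ hm,
            fun hC => hc' (List.mem_append_left _ hC)⟩, hss⟩
        rw [IH.2.2.2.2 s hex, pvGetD_set, if_neg ?_]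
        rintro ⟨hsw, -⟩
        exact hs ⟨w, ⟨List.mem_cons_self .., hwC⟩, hsw.symm⟩
    · -- w already seen
      have hwC : w ∈ (C : List Int) := by
        unfold PySem.Set.contains at hcw
        simpa using hcw
      have hstep : pvVisit d1 (w :: ws') news C R = pvVisit d1 ws' news C R := by
        rw [pvVisit, hcw]
        simp
      have IH := ih news C R (fun x hx => hws x (List.mem_cons_of_mem _ hx)) hR
      rw [hstep]
      refine ⟨IH.1, ?_, ?_, ?_, ?_⟩
      · intro y
        rw [IH.2.1 y]
        simp only [List.mem_cons]
        by_cases hyw : y = w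
        · subst hyw
          simp [hwC]
        · tauto
      · intro y
        rw [IH.2.2.1 y]
        simp only [List.mem_cons]
        by_cases hyw : y = w
        · subst hyw
          simp [hwC]
        · tauto
      · intro s hs
        refine IH.2.2.2.1 s ?_
        rcases hs with ⟨w', ⟨hm, hcm⟩, hss⟩
        rcases List.mem_cons.1 hm with h | h
        · exact absurd (h ▸ hwC) hcm
        · exact ⟨w', ⟨h, hcm⟩, hss⟩
      · intro s hs
        refine IH.2.2.2.2 s ?_
        rintro ⟨w', ⟨hm, hcm⟩, hss⟩
        exact hs ⟨w', ⟨List.mem_cons_of_mem _ hm, hcm⟩, hss⟩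

lemma pvExpand_spec (n : Int) (roads : List (Int × Int)) (destination : Int)
    (hc : pvCtx n roads destination) (net : List (PySem.Set Int))
    (hnet : ∀ x ∈ pvU roads destination, ∀ y,
      (y ∈ PySem.List.pyGetD net x PySem.Set.empty ↔ pvAdj roads x y)) (k : Int) :
    ∀ (F nxt : List Int) (C : PySem.Set Int) (R : List Int),
      (∀ x ∈ F, x ∈ pvU roads destination) → (∀ x ∈ F, x ∈ (C : List Int)) →
      (∀ x ∈ (C : List Int), x ∈ pvU roads destination) → R.length = (n + 1).toNat →
      (∀ x ∈ F, R.getD (pvSlot n x) 0 = k) →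
      ((pvExpand net F nxt C R).2.2.length = (n + 1).toNat ∧
       (∀ y, y ∈ ((pvExpand net F nxt C R).2.1 : List Int)
          ↔ y ∈ (C : List Int) ∨ ∃ x ∈ F, pvAdj roads x y) ∧
       (∀ y, y ∈ (pvExpand net F nxt C R).1
          ↔ y ∈ nxt ∨ ((∃ x ∈ F, pvAdj roads x y) ∧ y ∉ (C : List Int))) ∧
       (∀ s : Nat, (∃ y, ((∃ x ∈ F, pvAdj roads x y) ∧ y ∉ (C : List Int)) ∧ pvSlot n y = s)
          → (pvExpand net F nxt C R).2.2.getD s 0 = k + 1) ∧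
       (∀ s : Nat, ¬ (∃ y, ((∃ x ∈ F, pvAdj roads x y) ∧ y ∉ (C : List Int)) ∧ pvSlot n y = s)
          → (pvExpand net F nxt C R).2.2.getD s 0 = R.getD s 0)) := by
  intro F
  induction F with
  | nil =>
    intro nxt C R _ _ _ hR _
    refine ⟨by simp [pvExpand, hR], fun y => by simp [pvExpand], fun y => by simp [pvExpand],
      fun s hs => ?_, fun s _ => by simp [pvExpand]⟩
    rcases hs with ⟨y, ⟨⟨x, hx, _⟩, _⟩, _⟩
    simp at hx
  | cons now rest ih =>
    intro nxt C R hFU hFC hCU hR hFk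
    have hnowU := hFU now (List.mem_cons_self ..)
    have hrnow := hc.2.1 now hnowU
    have hnowC := hFC now (List.mem_cons_self ..)
    -- the neighbour list of 'now' is exactly its road-adjacency
    have hwsAdj : ∀ w, w ∈ PySem.List.pyGetD net now PySem.Set.empty ↔ pvAdj roads now w :=
      hnet now hnowU
    have hwsU : ∀ w ∈ PySem.List.pyGetD net now PySem.Set.empty, w ∈ pvU roads destination :=
      fun w hw => (pvAdj_mem ((hwsAdj w).1 hw)).2
    -- the distance written for this node is k + 1
    have hd1 : PySem.List.pyGetD R now 0 + 1 = k + 1 := by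
      rw [pvGet_bridge n now R 0 hc.1 hrnow hR, hFk now (List.mem_cons_self ..)]
    have V := pvVisit_spec n roads destination hc (PySem.List.pyGetD R now 0 + 1)
      (PySem.List.pyGetD net now PySem.Set.empty) nxt C R hwsU hR
    set s0 := pvVisit (PySem.List.pyGetD R now 0 + 1)
      (PySem.List.pyGetD net now PySem.Set.empty) nxt C R with hs0
    have hstep : pvExpand net (now :: rest) nxt C R = pvExpand net rest s0.1 s0.2.1 s0.2.2 := by
      rw [pvExpand]
    -- frontier values survive the visit
    have hFk' : ∀ x ∈ rest, s0.2.2.getD (pvSlot n x) 0 = k := by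
      intro x hx
      have hxU := hFU x (List.mem_cons_of_mem _ hx)
      have hxC := hFC x (List.mem_cons_of_mem _ hx)
      rw [V.2.2.2.2 (pvSlot n x) ?_]
      · exact hFk x (List.mem_cons_of_mem _ hx)
      · rintro ⟨w, ⟨hwm, hwc⟩, hws⟩
        have : w = x := pvSlot_inj n roads destination hc (hwsU w hwm) hxU hws
        exact hwc (this ▸ hxC)
    have IH := ih s0.1 s0.2.1 s0.2.2 (fun x hx => hFU x (List.mem_cons_of_mem _ hx))
      (fun x hx => (V.2.1 x).2 (Or.inl (hFC x (List.mem_cons_of_mem _ hx))))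
      (fun x hx => by
        rcases (V.2.1 x).1 hx with h | h
        · exact hCU x h
        · exact hwsU x h)
      V.1 hFk'
    rw [hstep]
    refine ⟨IH.1, ?_, ?_, ?_, ?_⟩
    · intro y
      rw [IH.2.1 y]
      constructor
      · rintro (hy | ⟨x, hx, hadj⟩)
        · rcases (V.2.1 y).1 hy with h | h
          · exact Or.inl h
          · exact Or.inr ⟨now, List.mem_cons_self .., (hwsAdj y).1 h⟩
        · exact Or.inr ⟨x, List.mem_cons_of_mem _ hx, hadj⟩
      · rintro (hy | ⟨x, hx, hadj⟩)
        · exact Or.inl ((V.2.1 y).2 (Or.inl hy))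
        · rcases List.mem_cons.1 hx with h | h
          · exact Or.inl ((V.2.1 y).2 (Or.inr ((hwsAdj y).2 (h ▸ hadj))))
          · exact Or.inr ⟨x, h, hadj⟩
    · intro y
      rw [IH.2.2.1 y]
      have hyC' : y ∈ (s0.2.1 : List Int) ↔ y ∈ (C : List Int) ∨ pvAdj roads now y := by
        rw [V.2.1 y]
        constructor
        · rintro (h | h)
          · exact Or.inl h
          · exact Or.inr ((hwsAdj y).1 h)
        · rintro (h | h)
          · exact Or.inl h
          · exact Or.inr ((hwsAdj y).2 h)
      constructor
      · rintro (hy | ⟨⟨x, hx, hadj⟩, hyc⟩)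
        · rcases (V.2.2.1 y).1 hy with h | ⟨h1, h2⟩
          · exact Or.inl h
          · exact Or.inr ⟨⟨now, List.mem_cons_self .., (hwsAdj y).1 h1⟩, h2⟩
        · refine Or.inr ⟨⟨x, List.mem_cons_of_mem _ hx, hadj⟩, fun hC => hyc (hyC'.2 (Or.inl hC))⟩
      · rintro (hy | ⟨⟨x, hx, hadj⟩, hyc⟩)
        · exact Or.inl ((V.2.2.1 y).2 (Or.inl hy))
        · rcases List.mem_cons.1 hx with h | h
          · exact Or.inl ((V.2.2.1 y).2 (Or.inr ⟨(hwsAdj y).2 (h ▸ hadj), hyc⟩))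
          · by_cases hadjnow : pvAdj roads now y
            · exact Or.inl ((V.2.2.1 y).2 (Or.inr ⟨(hwsAdj y).2 hadjnow, hyc⟩))
            · exact Or.inr ⟨⟨x, h, hadj⟩, fun hC => (hyC'.1 hC).elim hyc hadjnow⟩
    · intro s hs
      by_cases hex : ∃ y, ((∃ x ∈ rest, pvAdj roads x y) ∧ y ∉ (s0.2.1 : List Int))
          ∧ pvSlot n y = s
      · exact IH.2.2.2.1 s hex
      · rcases hs with ⟨y, ⟨⟨x, hx, hadj⟩, hyc⟩, hys⟩
        rcases List.mem_cons.1 hx with h | h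
        · have hv := V.2.2.2.1 s ⟨y, ⟨(hwsAdj y).2 (h ▸ hadj), hyc⟩, hys⟩
          rw [IH.2.2.2.2 s hex, hv, hd1]
        · by_cases hwsy : y ∈ PySem.List.pyGetD net now PySem.Set.empty
          · have hv := V.2.2.2.1 s ⟨y, ⟨hwsy, hyc⟩, hys⟩
            rw [IH.2.2.2.2 s hex, hv, hd1]
          · have hyc' : y ∉ (s0.2.1 : List Int) := fun hC =>
              ((V.2.1 y).1 hC).elim hyc hwsy
            exact absurd ⟨y, ⟨⟨x, h, hadj⟩, hyc'⟩, hys⟩ hex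
    · intro s hs
      have hexv : ¬ ∃ w, (w ∈ PySem.List.pyGetD net now PySem.Set.empty ∧ w ∉ (C : List Int))
          ∧ pvSlot n w = s := by
        rintro ⟨w, ⟨hm, hc'⟩, hss⟩
        exact hs ⟨w, ⟨⟨now, List.mem_cons_self .., (hwsAdj w).1 hm⟩, hc'⟩, hss⟩
      have hexr : ¬ ∃ y, ((∃ x ∈ rest, pvAdj roads x y) ∧ y ∉ (s0.2.1 : List Int))
          ∧ pvSlot n y = s := by
        rintro ⟨y, ⟨⟨x, hx, hadj⟩, hyc⟩, hys⟩
        exact hs ⟨y, ⟨⟨x, List.mem_cons_of_mem _ hx, hadj⟩,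
          fun hC => hyc ((V.2.1 y).2 (Or.inl hC))⟩, hys⟩
      rw [IH.2.2.2.2 s hexr, V.2.2.2.2 s hexv]

-- ---------- one relaxation round, characterised ----------
-- the labels the processed prefix l of a round discovers, given the pre-round array R
def pvQ (n : Int) (R : List Int) (k : Int) (l : List (Int × Int)) (y : Int) : Prop :=
  R.getD (pvSlot n y) 0 = -1 ∧ ∃ x, ((x, y) ∈ l ∨ (y, x) ∈ l) ∧ R.getD (pvSlot n x) 0 = k

lemma pvQ_memU (n : Int) (roads : List (Int × Int)) (destination : Int) (R : List Int)
    (k : Int) (l : List (Int × Int)) (hl : ∀ e ∈ l, e ∈ roads) (y : Int) :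
    pvQ n R k l y → y ∈ pvU roads destination := by
  rintro ⟨-, x, hpat | hpat, -⟩
  · exact (pvAdj_mem (Or.inl (hl _ hpat))).2
  · exact (pvAdj_mem (Or.inl (hl _ hpat))).1

lemma pvQ_val (n : Int) (R : List Int) (k : Int) (l : List (Int × Int)) (y : Int) :
    pvQ n R k l y → R.getD (pvSlot n y) 0 = -1 := fun h => h.1

lemma pvQ_append (n : Int) (R : List Int) (k : Int) (l : List (Int × Int)) (a b y : Int) :
    pvQ n R k (l ++ [(a, b)]) y ↔
      ((pvQ n R k l y ∨ (y = b ∧ R.getD (pvSlot n b) 0 = -1 ∧ R.getD (pvSlot n a) 0 = k))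
        ∨ (y = a ∧ R.getD (pvSlot n a) 0 = -1 ∧ R.getD (pvSlot n b) 0 = k)) := by
  unfold pvQ
  simp only [List.mem_append, List.mem_singleton, Prod.mk.injEq]
  constructor
  · rintro ⟨hy, x, (h | ⟨rfl, rfl⟩) | (h | ⟨rfl, rfl⟩), hxk⟩
    · exact Or.inl (Or.inl ⟨hy, x, Or.inl h, hxk⟩)
    · exact Or.inl (Or.inr ⟨rfl, hy, hxk⟩)
    · exact Or.inl (Or.inl ⟨hy, x, Or.inr h, hxk⟩)
    · exact Or.inr ⟨rfl, hy, hxk⟩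
  · rintro ((⟨hy, x, hpat, hxk⟩ | ⟨rfl, h1, h2⟩) | ⟨rfl, h1, h2⟩)
    · refine ⟨hy, x, ?_, hxk⟩
      rcases hpat with h | h
      · exact Or.inl (Or.inl h)
      · exact Or.inr (Or.inl h)
    · exact ⟨h1, a, Or.inl (Or.inr ⟨rfl, rfl⟩), h2⟩
    · exact ⟨h1, b, Or.inr (Or.inr ⟨rfl, rfl⟩), h2⟩

-- one relaxation half-step, characterised: it discovers exactly b when b is unassigned and a
-- carries the frontier value k
lemma pvHalfStep_spec (n : Int) (roads : List (Int × Int)) (destination : Int)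
    (hc : pvCtx n roads destination) (R : List Int) (k : Int)
    (hR : R.length = (n + 1).toNat) (hk : 0 ≤ k)
    (hval : ∀ x ∈ pvU roads destination,
      R.getD (pvSlot n x) 0 = -1 ∨ (0 ≤ R.getD (pvSlot n x) 0 ∧ R.getD (pvSlot n x) 0 ≤ k))
    (hfr : ∀ x y, pvAdj roads x y → 0 ≤ R.getD (pvSlot n x) 0 → R.getD (pvSlot n x) 0 < k →
      0 ≤ R.getD (pvSlot n y) 0)
    (a b : Int) (hab : pvAdj roads a b) (Q : Int → Prop)
    (hQU : ∀ y, Q y → y ∈ pvU roads destination)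
    (hQval : ∀ y, Q y → R.getD (pvSlot n y) 0 = -1)
    (st : List Int × Bool) (hstlen : st.1.length = (n + 1).toNat)
    (hpos : ∀ s : Nat, (∃ y, Q y ∧ pvSlot n y = s) → st.1.getD s 0 = k + 1)
    (hneg : ∀ s : Nat, ¬ (∃ y, Q y ∧ pvSlot n y = s) → st.1.getD s 0 = R.getD s 0)
    (hflag : st.2 = true ↔ ∃ y, Q y) :
    (pvHalfStep R st a b).1.length = (n + 1).toNat ∧
    (∀ s : Nat, (∃ y, (Q y ∨ (y = b ∧ R.getD (pvSlot n b) 0 = -1 ∧ R.getD (pvSlot n a) 0 = k))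
        ∧ pvSlot n y = s) → (pvHalfStep R st a b).1.getD s 0 = k + 1) ∧
    (∀ s : Nat, ¬ (∃ y, (Q y ∨ (y = b ∧ R.getD (pvSlot n b) 0 = -1 ∧ R.getD (pvSlot n a) 0 = k))
        ∧ pvSlot n y = s) → (pvHalfStep R st a b).1.getD s 0 = R.getD s 0) ∧
    ((pvHalfStep R st a b).2 = true ↔
      ∃ y, Q y ∨ (y = b ∧ R.getD (pvSlot n b) 0 = -1 ∧ R.getD (pvSlot n a) 0 = k)) := by
  obtain ⟨hn, hrange, halias⟩ := hc
  have haU := (pvAdj_mem (destination := destination) hab).1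
  have hbU := (pvAdj_mem (destination := destination) hab).2
  have hra := hrange a haU
  have hrb := hrange b hbU
  have hga : PySem.List.pyGetD R a 0 = R.getD (pvSlot n a) 0 :=
    pvGet_bridge n a R 0 hn hra hR
  have hgb : PySem.List.pyGetD st.1 b 0 = st.1.getD (pvSlot n b) 0 :=
    pvGet_bridge n b st.1 0 hn hrb hstlen
  unfold pvHalfStep
  by_cases hQb : ∃ y, Q y ∧ pvSlot n y = pvSlot n b
  · -- the slot of b is already written this round: the if cannot fire
    have hQbb : Q b := by
      rcases hQb with ⟨y, hQy, hs⟩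
      have := pvSlot_inj n roads destination ⟨hn, hrange, halias⟩ (hQU y hQy) hbU hs
      exact this ▸ hQy
    have hcond : ¬ (0 ≤ PySem.List.pyGetD R a 0 ∧ PySem.List.pyGetD st.1 b 0 = -1) := by
      rintro ⟨-, h2⟩
      rw [hgb, hpos _ hQb] at h2
      omega
    rw [if_neg hcond]
    refine ⟨hstlen, ?_, ?_, ?_⟩
    · rintro s ⟨y, hy | ⟨rfl, -, -⟩, hs⟩
      · exact hpos s ⟨y, hy, hs⟩
      · exact hpos s ⟨y, hQbb, hs⟩
    · intro s hne
      exact hneg s (fun ⟨y, hy, hs⟩ => hne ⟨y, Or.inl hy, hs⟩)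
    · rw [hflag]
      constructor
      · rintro ⟨y, hy⟩
        exact ⟨y, Or.inl hy⟩
      · rintro ⟨y, hy | ⟨rfl, -, -⟩⟩
        · exact ⟨y, hy⟩
        · exact ⟨y, hQbb⟩
  · have hstb : st.1.getD (pvSlot n b) 0 = R.getD (pvSlot n b) 0 := hneg _ hQb
    by_cases hcnd : 0 ≤ R.getD (pvSlot n a) 0 ∧ R.getD (pvSlot n b) 0 = -1
    · -- the write fires, and the source value must be exactly k
      have hva : R.getD (pvSlot n a) 0 = k := by
        rcases hval a haU with h | ⟨h1, h2⟩
        · omega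
        · by_contra hne
          have := hfr a b hab h1 (lt_of_le_of_ne h2 hne)
          omega
      have hcond : 0 ≤ PySem.List.pyGetD R a 0 ∧ PySem.List.pyGetD st.1 b 0 = -1 :=
        ⟨by rw [hga]; exact hcnd.1, by rw [hgb, hstb]; exact hcnd.2⟩
      rw [if_pos hcond]
      have hsetb : PySem.List.pySetD st.1 b (PySem.List.pyGetD R a 0 + 1)
          = st.1.set (pvSlot n b) (k + 1) := by
        rw [pvSet_bridge n b st.1 _ hn hrb hstlen, hga, hva]
      have hsblt : pvSlot n b < st.1.length := by
        rw [hstlen]; exact pvSlot_lt n b hn hrb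
      refine ⟨by simp [hsetb, hstlen], ?_, ?_, ?_⟩
      · rintro s ⟨y, hy, hs⟩
        show (PySem.List.pySetD st.1 b (PySem.List.pyGetD R a 0 + 1)).getD s 0 = k + 1
        rw [hsetb, pvGetD_set]
        rcases hy with hQy | ⟨rfl, -, -⟩
        · split_ifs with h
          · rfl
          · exact hpos s ⟨y, hQy, hs⟩
        · rw [if_pos ⟨hs.symm, hsblt⟩]
      · intro s hne
        have hsb : s ≠ pvSlot n b := fun h =>
          hne ⟨b, Or.inr ⟨rfl, hcnd.2, hva⟩, h.symm⟩
        show (PySem.List.pySetD st.1 b (PySem.List.pyGetD R a 0 + 1)).getD s 0 = R.getD s 0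
        rw [hsetb, pvGetD_set, if_neg (fun h => hsb h.1)]
        exact hneg s (fun ⟨y, hy, hs⟩ => hne ⟨y, Or.inl hy, hs⟩)
      · exact ⟨fun _ => ⟨b, Or.inr ⟨rfl, hcnd.2, hva⟩⟩, fun _ => rfl⟩
    · -- nothing to do for this direction
      have hcond : ¬ (0 ≤ PySem.List.pyGetD R a 0 ∧ PySem.List.pyGetD st.1 b 0 = -1) := by
        rw [hga, hgb, hstb]
        exact hcnd
      rw [if_neg hcond]
      have hnob : ¬ (R.getD (pvSlot n b) 0 = -1 ∧ R.getD (pvSlot n a) 0 = k) := by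
        rintro ⟨h1, h2⟩
        exact hcnd ⟨h2 ▸ hk, h1⟩
      refine ⟨hstlen, ?_, ?_, ?_⟩
      · rintro s ⟨y, hy | ⟨rfl, h1, h2⟩, hs⟩
        · exact hpos s ⟨y, hy, hs⟩
        · exact absurd ⟨h1, h2⟩ hnob
      · intro s hne
        exact hneg s (fun ⟨y, hy, hs⟩ => hne ⟨y, Or.inl hy, hs⟩)
      · rw [hflag]
        constructor
        · rintro ⟨y, hy⟩
          exact ⟨y, Or.inl hy⟩
        · rintro ⟨y, hy | ⟨rfl, h1, h2⟩⟩
          · exact ⟨y, hy⟩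
          · exact absurd ⟨h1, h2⟩ hnob

lemma pvRound_spec (n : Int) (roads : List (Int × Int)) (destination : Int)
    (hc : pvCtx n roads destination) (R : List Int) (k : Int)
    (hR : R.length = (n + 1).toNat) (hk : 0 ≤ k)
    (hval : ∀ x ∈ pvU roads destination,
      R.getD (pvSlot n x) 0 = -1 ∨ (0 ≤ R.getD (pvSlot n x) 0 ∧ R.getD (pvSlot n x) 0 ≤ k))
    (hfr : ∀ x y, pvAdj roads x y → 0 ≤ R.getD (pvSlot n x) 0 → R.getD (pvSlot n x) 0 < k →
      0 ≤ R.getD (pvSlot n y) 0) :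
    ∀ (l2 l1 : List (Int × Int)) (st : List Int × Bool),
      (∀ e ∈ l1, e ∈ roads) → (∀ e ∈ l2, e ∈ roads) →
      st.1.length = (n + 1).toNat →
      (∀ s : Nat, (∃ y, pvQ n R k l1 y ∧ pvSlot n y = s) → st.1.getD s 0 = k + 1) →
      (∀ s : Nat, ¬ (∃ y, pvQ n R k l1 y ∧ pvSlot n y = s) → st.1.getD s 0 = R.getD s 0) →
      (st.2 = true ↔ ∃ y, pvQ n R k l1 y) →
      ((l2.foldl (pvRelaxStep R) st).1.length = (n + 1).toNat ∧
       (∀ s : Nat, (∃ y, pvQ n R k (l1 ++ l2) y ∧ pvSlot n y = s)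
          → (l2.foldl (pvRelaxStep R) st).1.getD s 0 = k + 1) ∧
       (∀ s : Nat, ¬ (∃ y, pvQ n R k (l1 ++ l2) y ∧ pvSlot n y = s)
          → (l2.foldl (pvRelaxStep R) st).1.getD s 0 = R.getD s 0) ∧
       ((l2.foldl (pvRelaxStep R) st).2 = true ↔ ∃ y, pvQ n R k (l1 ++ l2) y)) := by
  intro l2
  induction l2 with
  | nil =>
    intro l1 st hl1 _ hstlen hpos hneg hflag
    simp only [List.foldl_nil, List.append_nil]
    exact ⟨hstlen, hpos, hneg, hflag⟩
  | cons e l2' ih =>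
    obtain ⟨a, b⟩ := e
    intro l1 st hl1 hl2 hstlen hpos hneg hflag
    have he : (a, b) ∈ roads := hl2 _ (List.mem_cons_self ..)
    have H1 := pvHalfStep_spec n roads destination hc R k hR hk hval hfr a b (Or.inl he)
      (pvQ n R k l1) (pvQ_memU n roads destination R k l1 hl1) (pvQ_val n R k l1)
      st hstlen hpos hneg hflag
    have H2 := pvHalfStep_spec n roads destination hc R k hR hk hval hfr b a (Or.inr he)
      (fun y => pvQ n R k l1 y ∨ (y = b ∧ R.getD (pvSlot n b) 0 = -1 ∧ R.getD (pvSlot n a) 0 = k))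
      (fun y hy => by
        rcases hy with hy | ⟨rfl, -, -⟩
        · exact pvQ_memU n roads destination R k l1 hl1 y hy
        · exact (pvAdj_mem (Or.inl he)).2)
      (fun y hy => by
        rcases hy with hy | ⟨rfl, h1, -⟩
        · exact hy.1
        · exact h1)
      (pvHalfStep R st a b) H1.1 H1.2.1 H1.2.2.1 H1.2.2.2
    -- the two half-steps together discover exactly pvQ (l1 ++ [(a,b)])
    have hQiff : ∀ y, ((pvQ n R k l1 y ∨ (y = b ∧ R.getD (pvSlot n b) 0 = -1
          ∧ R.getD (pvSlot n a) 0 = k))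
        ∨ (y = a ∧ R.getD (pvSlot n a) 0 = -1 ∧ R.getD (pvSlot n b) 0 = k))
        ↔ pvQ n R k (l1 ++ [(a, b)]) y :=
      fun y => (pvQ_append n R k l1 a b y).symm
    have IH := ih (l1 ++ [(a, b)]) (pvRelaxStep R st (a, b))
      (fun e he' => by
        rcases List.mem_append.1 he' with h | h
        · exact hl1 _ h
        · exact List.mem_singleton.1 h ▸ he)
      (fun e he' => hl2 _ (List.mem_cons_of_mem _ he'))
      H2.1
      (fun s hs => H2.2.1 s (by
        rcases hs with ⟨y, hy, hss⟩
        exact ⟨y, (hQiff y).2 hy, hss⟩))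
      (fun s hs => H2.2.2.1 s (by
        rintro ⟨y, hy, hss⟩
        exact hs ⟨y, (hQiff y).1 hy, hss⟩))
      (by
        rw [show pvRelaxStep R st (a, b) = pvHalfStep R (pvHalfStep R st a b) b a from rfl,
          H2.2.2.2]
        constructor
        · rintro ⟨y, hy⟩
          exact ⟨y, (hQiff y).1 hy⟩
        · rintro ⟨y, hy⟩
          exact ⟨y, (hQiff y).2 hy⟩)
    have hassoc : l1 ++ (a, b) :: l2' = (l1 ++ [(a, b)]) ++ l2' := by
      rw [List.append_cons]
    rw [List.foldl_cons]
    rw [hassoc]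
    exact IH

-- ---------- the joint invariant and the main simulation ----------
def pvInv (n : Int) (roads : List (Int × Int)) (destination : Int)
    (F : List Int) (C : PySem.Set Int) (R : List Int) (k : Int) : Prop :=
  R.length = (n + 1).toNat ∧ 0 ≤ k ∧
  (∀ x ∈ F, x ∈ pvU roads destination) ∧ (∀ x ∈ F, x ∈ (C : List Int)) ∧
  (∀ x ∈ (C : List Int), x ∈ pvU roads destination) ∧
  (∀ x ∈ pvU roads destination, (x ∈ (C : List Int) ↔ 0 ≤ R.getD (pvSlot n x) 0)) ∧
  (∀ x ∈ pvU roads destination, (x ∈ F ↔ R.getD (pvSlot n x) 0 = k)) ∧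
  (∀ x ∈ pvU roads destination,
    R.getD (pvSlot n x) 0 = -1 ∨ (0 ≤ R.getD (pvSlot n x) 0 ∧ R.getD (pvSlot n x) 0 ≤ k)) ∧
  (∀ x y, pvAdj roads x y → 0 ≤ R.getD (pvSlot n x) 0 → R.getD (pvSlot n x) 0 < k →
    0 ≤ R.getD (pvSlot n y) 0)

lemma pvMain (n : Int) (roads : List (Int × Int)) (destination : Int)
    (hc : pvCtx n roads destination) :
    ∀ (N : Nat) (F : List Int) (C : PySem.Set Int) (R : List Int) (k : Int),
      ((Finset.range (n + 1).toNat).filter (fun s => R.getD s 0 = -1)).card = N →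
      pvInv n roads destination F C R k →
      pvLoopB (pvBuildNet n roads) F C R = pvRelaxLoop roads R := by
  intro N
  induction N using Nat.strong_induction_on with
  | _ N IH =>
    intro F C R k hN hInv
    obtain ⟨hR, hk, hFU, hFC, hCU, hCiff, hFiff, hvals, hfr⟩ := hInv
    have hnet := pvNet_spec n roads destination hc
    have RS := pvRound_spec n roads destination hc R k hR hk hvals hfr roads [] (R, false)
      (by simp) (fun e he => he) hR
      (fun s hs => absurd hs (by rintro ⟨y, ⟨-, x, hpat | hpat, -⟩, -⟩ <;> simp at hpat))
      (fun s _ => rfl)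
      (by
        constructor
        · intro h
          simp at h
        · rintro ⟨y, -, x, hpat | hpat, -⟩ <;> simp at hpat)
    simp only [List.nil_append] at RS
    rw [← show pvRound roads R = List.foldl (pvRelaxStep R) (R, false) roads from rfl] at RS
    -- the BFS discovery set of this level is exactly what the relaxation round discovers
    have hD : ∀ y, ((∃ x ∈ F, pvAdj roads x y) ∧ y ∉ (C : List Int)) ↔ pvQ n R k roads y := by
      intro y
      constructor
      · rintro ⟨⟨x, hxF, hadj⟩, hyC⟩
        have hyU := (pvAdj_mem (destination := destination) hadj).2
        have hxU := (pvAdj_mem (destination := destination) hadj).1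
        have hyval : R.getD (pvSlot n y) 0 = -1 := by
          rcases hvals y hyU with h | ⟨h1, -⟩
          · exact h
          · exact absurd ((hCiff y hyU).2 h1) hyC
        exact ⟨hyval, x, hadj, (hFiff x hxU).1 hxF⟩
      · rintro ⟨hyval, x, hpat, hxk⟩
        have hxU := (pvAdj_mem (destination := destination) (show pvAdj roads x y from hpat)).1
        have hyU := (pvAdj_mem (destination := destination) (show pvAdj roads x y from hpat)).2
        refine ⟨⟨x, (hFiff x hxU).2 hxk, hpat⟩, fun hC => ?_⟩
        have := (hCiff y hyU).1 hC
        omega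
    cases F with
    | nil =>
      rw [pvLoopB, pvRelaxLoop]
      have hnoQ : ¬ ∃ y, pvQ n R k roads y := by
        rintro ⟨y, hQ⟩
        rcases ((hD y).2 hQ).1 with ⟨x, hx, -⟩
        simp at hx
      have hflag : ¬ (pvRound roads R).2 = true := fun h => hnoQ (RS.2.2.2.1 h)
      rw [dif_neg hflag]
      refine (pv_ext _ _ (RS.1.trans hR.symm) ?_).symm
      intro s
      exact RS.2.2.1 s (fun ⟨y, hQ, _⟩ => hnoQ ⟨y, hQ⟩)
    | cons now rest =>
      have ES := pvExpand_spec n roads destination hc (pvBuildNet n roads) hnet.2 k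
        (now :: rest) [] C R hFU hFC hCU hR
        (fun x hx => (hFiff x (hFU x hx)).1 hx)
      rw [pvLoopB]
      show pvLoopB (pvBuildNet n roads)
          (pvExpand (pvBuildNet n roads) (now :: rest) [] C R).1
          (pvExpand (pvBuildNet n roads) (now :: rest) [] C R).2.1
          (pvExpand (pvBuildNet n roads) (now :: rest) [] C R).2.2
        = pvRelaxLoop roads R
      set s0 := pvExpand (pvBuildNet n roads) (now :: rest) [] C R with hs0
      by_cases hQex : ∃ y, pvQ n R k roads y
      · -- a discovering level/round on both sides
        have hflag : (pvRound roads R).2 = true := RS.2.2.2.2 hQex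
        rw [pvRelaxLoop, dif_pos hflag]
        have harr : (pvRound roads R).1 = s0.2.2 := by
          refine pv_ext _ _ (RS.1.trans ES.1.symm) ?_
          intro s
          by_cases hcond : ∃ y, pvQ n R k roads y ∧ pvSlot n y = s
          · rw [RS.2.1 s hcond, ES.2.2.2.1 s ?_]
            rcases hcond with ⟨y, hQ, hss⟩
            exact ⟨y, (hD y).2 hQ, hss⟩
          · rw [RS.2.2.1 s hcond, ES.2.2.2.2 s ?_]
            rintro ⟨y, hDy, hss⟩
            exact hcond ⟨y, (hD y).1 hDy, hss⟩
        rw [harr]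
        -- the measure strictly decreases
        have hsub : ((Finset.range (n + 1).toNat).filter (fun s => s0.2.2.getD s 0 = -1))
            ⊆ ((Finset.range (n + 1).toNat).filter (fun s => R.getD s 0 = -1)) := by
          intro s hs
          rw [Finset.mem_filter] at hs ⊢
          refine ⟨hs.1, ?_⟩
          by_cases hcond : ∃ y, ((∃ x ∈ (now :: rest), pvAdj roads x y) ∧ y ∉ (C : List Int))
              ∧ pvSlot n y = s
          · rw [ES.2.2.2.1 s hcond] at hs
            omega
          · rw [← ES.2.2.2.2 s hcond]
            exact hs.2
        obtain ⟨y0, hQ0⟩ := hQex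
        have hy0U := pvQ_memU n roads destination R k roads (fun _ h => h) y0 hQ0
        have hy0lt : pvSlot n y0 < (n + 1).toNat := pvSlot_lt n y0 hc.1 (hc.2.1 y0 hy0U)
        have hwit_in : pvSlot n y0
            ∈ (Finset.range (n + 1).toNat).filter (fun s => R.getD s 0 = -1) := by
          rw [Finset.mem_filter]
          exact ⟨Finset.mem_range.2 hy0lt, hQ0.1⟩
        have hwit_out : pvSlot n y0
            ∉ (Finset.range (n + 1).toNat).filter (fun s => s0.2.2.getD s 0 = -1) := by
          rw [Finset.mem_filter]
          rintro ⟨-, hv⟩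
          rw [ES.2.2.2.1 (pvSlot n y0) ⟨y0, (hD y0).2 hQ0, rfl⟩] at hv
          omega
        have hmeas : ((Finset.range (n + 1).toNat).filter
            (fun s => s0.2.2.getD s 0 = -1)).card < N := by
          rw [← hN]
          exact Finset.card_lt_card ⟨hsub, fun hsup => hwit_out (hsup hwit_in)⟩
        -- the invariant advances to level k + 1
        have hDU : ∀ y, ((∃ x ∈ (now :: rest), pvAdj roads x y) ∧ y ∉ (C : List Int))
            → y ∈ pvU roads destination := by
          rintro y ⟨⟨x, -, hadj⟩, -⟩
          exact (pvAdj_mem hadj).2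
        have hval' : ∀ x ∈ pvU roads destination,
            ¬ ((∃ x' ∈ (now :: rest), pvAdj roads x' x) ∧ x ∉ (C : List Int)) →
            s0.2.2.getD (pvSlot n x) 0 = R.getD (pvSlot n x) 0 := by
          intro x hxU hDx
          refine ES.2.2.2.2 _ ?_
          rintro ⟨y, hDy, hys⟩
          have := pvSlot_inj n roads destination hc (hDU y hDy) hxU hys
          exact hDx (this ▸ hDy)
        have hInv' : pvInv n roads destination s0.1 s0.2.1 s0.2.2 (k + 1) := by
          refine ⟨ES.1, by omega, ?_, ?_, ?_, ?_, ?_, ?_, ?_⟩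
          · intro x hx
            rcases (ES.2.2.1 x).1 hx with h | ⟨hDx, -⟩
            · simp at h
            · rcases hDx with ⟨x', -, hadj⟩
              exact (pvAdj_mem hadj).2
          · intro x hx
            rcases (ES.2.2.1 x).1 hx with h | ⟨⟨x', hx', hadj⟩, -⟩
            · simp at h
            · exact (ES.2.1 x).2 (Or.inr ⟨x', hx', hadj⟩)
          · intro x hx
            rcases (ES.2.1 x).1 hx with h | ⟨x', -, hadj⟩
            · exact hCU x h
            · exact (pvAdj_mem hadj).2
          · intro x hxU
            by_cases hDx : (∃ x' ∈ (now :: rest), pvAdj roads x' x) ∧ x ∉ (C : List Int)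
            · constructor
              · intro _
                rw [ES.2.2.2.1 (pvSlot n x) ⟨x, hDx, rfl⟩]
                omega
              · intro _
                exact (ES.2.1 x).2 (Or.inr hDx.1)
            · rw [hval' x hxU hDx]
              constructor
              · intro hC'
                rcases (ES.2.1 x).1 hC' with h | h
                · exact (hCiff x hxU).1 h
                · by_cases hxC : x ∈ (C : List Int)
                  · exact (hCiff x hxU).1 hxC
                  · exact absurd ⟨h, hxC⟩ hDx
              · intro hval0
                exact (ES.2.1 x).2 (Or.inl ((hCiff x hxU).2 hval0))
          · intro x hxU
            by_cases hDx : (∃ x' ∈ (now :: rest), pvAdj roads x' x) ∧ x ∉ (C : List Int)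
            · constructor
              · intro _
                exact ES.2.2.2.1 (pvSlot n x) ⟨x, hDx, rfl⟩
              · intro _
                exact (ES.2.2.1 x).2 (Or.inr hDx)
            · rw [hval' x hxU hDx]
              constructor
              · intro hx
                rcases (ES.2.2.1 x).1 hx with h | h
                · simp at h
                · exact absurd h hDx
              · intro hvx
                rcases hvals x hxU with h | ⟨-, h2⟩ <;> omega
          · intro x hxU
            by_cases hex : ∃ y, ((∃ x' ∈ (now :: rest), pvAdj roads x' y) ∧ y ∉ (C : List Int))
                ∧ pvSlot n y = pvSlot n x
            · rw [ES.2.2.2.1 _ hex]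
              right
              omega
            · rw [ES.2.2.2.2 _ hex]
              rcases hvals x hxU with h | ⟨h1, h2⟩
              · exact Or.inl h
              · exact Or.inr ⟨h1, by omega⟩
          · intro x y hadj h0 hlt
            have hxU := (pvAdj_mem (destination := destination) hadj).1
            have hyU := (pvAdj_mem (destination := destination) hadj).2
            by_cases hex_y : ∃ z, ((∃ x' ∈ (now :: rest), pvAdj roads x' z) ∧ z ∉ (C : List Int))
                ∧ pvSlot n z = pvSlot n y
            · rw [ES.2.2.2.1 _ hex_y]
              omega
            · rw [ES.2.2.2.2 _ hex_y]
              by_cases hDx : (∃ x' ∈ (now :: rest), pvAdj roads x' x) ∧ x ∉ (C : List Int)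
              · rw [ES.2.2.2.1 (pvSlot n x) ⟨x, hDx, rfl⟩] at h0 hlt
                omega
              · rw [hval' x hxU hDx] at h0 hlt
                by_cases hvx : R.getD (pvSlot n x) 0 < k
                · exact hfr x y hadj h0 hvx
                · have hvxk : R.getD (pvSlot n x) 0 = k := by omega
                  rcases hvals y hyU with hy1 | ⟨hy1, -⟩
                  · exfalso
                    have hyC : y ∉ (C : List Int) := fun hC => by
                      have := (hCiff y hyU).1 hC
                      omega
                    exact hex_y ⟨y, ⟨⟨x, (hFiff x hxU).2 hvxk, hadj⟩, hyC⟩, rfl⟩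
                  · exact hy1
        exact IH _ hmeas s0.1 s0.2.1 s0.2.2 (k + 1) rfl hInv'
      · -- a silent final level/round on both sides
        have hnoD : ∀ y, ¬ ((∃ x ∈ (now :: rest), pvAdj roads x y) ∧ y ∉ (C : List Int)) :=
          fun y hDy => hQex ⟨y, (hD y).1 hDy⟩
        have harr : s0.2.2 = R := pv_ext _ _ (ES.1.trans hR.symm)
          (fun s => ES.2.2.2.2 s (by rintro ⟨y, hDy, -⟩; exact hnoD y hDy))
        have hfr0 : s0.1 = [] := by
          rcases hemp : s0.1 with _ | ⟨y, t⟩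
          · rfl
          · exfalso
            have hy : y ∈ s0.1 := by rw [hemp]; exact List.mem_cons_self ..
            rcases (ES.2.2.1 y).1 hy with h | h
            · simp at h
            · exact hnoD y h
        rw [hfr0, harr, pvLoopB]
        rw [pvRelaxLoop]
        have hflag : ¬ (pvRound roads R).2 = true := fun h => hQex (RS.2.2.2.1 h)
        rw [dif_neg hflag]
        refine (pv_ext _ _ (RS.1.trans hR.symm) ?_).symm
        intro s
        exact RS.2.2.1 s (fun ⟨y, hQ, _⟩ => hQex ⟨y, hQ⟩)

-- ===== VERDICT (by name: the statement is the Claim_ definition above) =====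
theorem solution_spec : Claim_equal_solution := by
  intro n roads sources destination _ hpre
  obtain ⟨hn, hroads, hsrc, hdest, halias⟩ := hpre
  have hc : pvCtx n roads destination := by
    refine ⟨hn, ?_, halias⟩
    intro x hx
    simp only [pvU, List.mem_cons, List.mem_append, List.mem_map] at hx
    rcases hx with rfl | ⟨p, hp, rfl⟩ | ⟨p, hp, rfl⟩
    · exact hdest
    · exact ⟨(hroads p hp).1, (hroads p hp).2.1⟩
    · exact ⟨(hroads p hp).2.2.1, (hroads p hp).2.2.2⟩
  have hdU : destination ∈ pvU roads destination := List.mem_cons_self ..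
  set R0 := PySem.List.pySetD (List.replicate (n + 1).toNat (-1 : Int)) destination 0 with hR0
  have hR0set : R0 = (List.replicate (n + 1).toNat (-1 : Int)).set (pvSlot n destination) 0 :=
    pvSet_bridge n destination _ 0 hn hdest (List.length_replicate)
  have hR0len : R0.length = (n + 1).toNat := by rw [hR0set]; simp
  have hdlt : pvSlot n destination < (n + 1).toNat := pvSlot_lt n destination hn hdest
  have hR0val : ∀ x ∈ pvU roads destination,
      R0.getD (pvSlot n x) 0 = if x = destination then 0 else -1 := by
    intro x hxU
    have hrx := hc.2.1 x hxU
    rw [hR0set, pvGetD_set]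
    by_cases hxd : x = destination
    · subst hxd
      rw [if_pos ⟨rfl, by simpa using hdlt⟩, if_pos rfl]
    · rw [if_neg (fun h => hxd (pvSlot_inj n roads destination hc hxU hdU h.1)), if_neg hxd]
      rw [List.getD_eq_getElem?_getD, List.getElem?_replicate,
        if_pos (pvSlot_lt n x hn hrx)]
      rfl
  have hInv0 : pvInv n roads destination [destination]
      (PySem.Set.add PySem.Set.empty destination) R0 0 := by
    have hCis : (PySem.Set.add PySem.Set.empty destination : List Int) = [destination] := rfl
    refine ⟨hR0len, le_refl 0, ?_, ?_, ?_, ?_, ?_, ?_, ?_⟩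
    · intro x hx
      rw [List.mem_singleton.1 hx]
      exact hdU
    · intro x hx
      rw [hCis]
      exact hx
    · intro x hx
      rw [hCis] at hx
      rw [List.mem_singleton.1 hx]
      exact hdU
    · intro x hxU
      rw [hCis, List.mem_singleton, hR0val x hxU]
      by_cases hxd : x = destination <;> simp [hxd]
    · intro x hxU
      rw [List.mem_singleton, hR0val x hxU]
      by_cases hxd : x = destination <;> simp [hxd]
    · intro x hxU
      rw [hR0val x hxU]
      by_cases hxd : x = destination <;> simp [hxd]
    · intro x y hadj
      have hxU := (pvAdj_mem (destination := destination) hadj).1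
      rw [hR0val x hxU]
      by_cases hxd : x = destination <;> simp [hxd]
  show sources.foldl (fun answer source => answer ++ [PySem.List.pyGetD
      (pvLoopA (pvBuildNet n roads) [destination]
        (PySem.Set.add PySem.Set.empty destination) R0) source 0]) []
    = sources.map (fun source => PySem.List.pyGetD (pvRelaxLoop roads R0) source 0)
  rw [PySem.List.foldl_append_singleton_eq_map]
  rw [pvLoopAB, pvMain n roads destination hc _ [destination]
    (PySem.Set.add PySem.Set.empty destination) R0 0 rfl hInv0]
  rw [List.nil_append]
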